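-- pv_equiv track=rewrite | github.com/Tom-Milton/Interconnection-Networks-Coursework | Int_Nets_routing_nvzf61.py | alltoall_traffic
-- ===== SOURCE A (Python) =====
-- def increment_node(k, n, node):
--     """ Builds the lexicographically next node after 'node' or signals
--         that 'node' is the last node via 'last_node' = True """
--     last_node = True
--     all_checked = False
--     i = k - 1
--     while last_node == True and all_checked == False:
--         if node[i] < n - 1:
--             last_node = False
--             node[i] = node[i] + 1
--             for j in range(k - 1, i, -1):
--                 node[j] = 0
--         else:
--             i = i - 1
--             if i == -1:
--                 all_checked = True
--     return last_node, node
--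
-- def test_permutation(k, n, node):
--     """ Checks that the list 'node' is in the form of a permutation, i.e., all k elements are distinct """
--     permutation = True
--     i = 0
--     while i < k - 1 and permutation == True:
--         j = i + 1
--         while j < k and permutation == True:
--             if node[i] == node[j]:
--                 permutation = False
--             j = j + 1
--         i = i + 1
--     return permutation
--
-- def alltoall_traffic(k, n):
--     """ Generates a list of source nodes 'list_of_sources' and a list of destination nodes
--         'list_of_destinations', both lists of length [n!/(n-k)!]^2, such that every pair of nodes
--         appears as a pair in 'list_of_sources[i]' x 'list_of_destinations[i]' (including
--         pairs of the form [node, node]) """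
--     list_of_nodes = []
--     node = []
--     for i in range(0, k):
--         node.append(i)
--     list_of_nodes.append(node[:])
--
--     last_node = False
--     while last_node == False:
--         last_node, node = increment_node(k, n, node)
--         if last_node == False:
--             if test_permutation(k, n, node):
--                 list_of_nodes.append(node[:])
--
--     list_of_sources = []
--     list_of_destinations = []
--     for source in list_of_nodes:
--         for target in list_of_nodes:
--             list_of_sources.append(source[:])
--             list_of_destinations.append(target[:])
--     return list_of_sources, list_of_destinations
-- ===== SOURCE B (Python) =====
-- def alltoall_traffic(k, n):
--     """ Generates a list of source nodes 'list_of_sources' and a list of destination nodes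
--         'list_of_destinations' pairing every node with every node: the unconditionally
--         seeded initial node [0..k-1] followed by every other k-permutation of range(n),
--         in lexicographic order. """
--     def perms(pool, r):
--         if r == 0:
--             return [[]]
--         return [[pool[i]] + rest
--                 for i in range(len(pool))
--                 for rest in perms(pool[:i] + pool[i + 1:], r - 1)]
--     initial = list(range(k))
--     list_of_nodes = [initial] + [p for p in perms(list(range(n)), k) if p != initial]
--     list_of_sources = [source[:] for source in list_of_nodes for _ in list_of_nodes]
--     list_of_destinations = [target[:] for _ in list_of_nodes for target in list_of_nodes]
--     return list_of_sources, list_of_destinations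
-- ===== Notes on version B (the rewrite author's own statement) =====
-- stated objective: faster
-- what changed: Replaces the generate-and-test machinery (enumerate all n^k digit tuples with a hand-written increment routine and filter with a quadratic distinctness test) by a recursive backtracking generator that builds only the k-permutations directly in the same lexicographic order, keeping A's unconditional seeding of the initial node [0..k-1] at the head of the list; the cross product is built with comprehensions instead of nested appending loops.
import Mathlib
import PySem

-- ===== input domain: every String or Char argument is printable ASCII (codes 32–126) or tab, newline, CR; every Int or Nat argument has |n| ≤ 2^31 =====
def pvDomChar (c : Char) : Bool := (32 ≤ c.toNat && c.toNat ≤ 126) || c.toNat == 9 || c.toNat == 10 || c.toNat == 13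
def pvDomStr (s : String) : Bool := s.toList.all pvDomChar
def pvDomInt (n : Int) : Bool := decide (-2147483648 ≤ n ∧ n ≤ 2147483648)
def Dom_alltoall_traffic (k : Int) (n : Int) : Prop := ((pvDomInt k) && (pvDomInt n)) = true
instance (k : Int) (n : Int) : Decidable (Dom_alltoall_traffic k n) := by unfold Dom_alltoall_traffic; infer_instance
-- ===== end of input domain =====

-- B replaces A's enumerate-all-n^k-tuples-and-filter machinery by a recursive backtracking
-- generator that emits exactly the k-permutations in the same lexicographic order.

-- ===== PORT A =====

-- 'for j in range(k-1, i, -1): node[j] = 0' inside increment_node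
def pvZeroTail (k i : Int) (node : List Int) : List Int :=
  (PySem.List.pyRange (k - 1) i (-1)).foldl (fun nd j => PySem.List.pySetD nd j 0) node

-- the 'while last_node == True and all_checked == False' loop of increment_node; the scan
-- index i (Python: i = k-1, k-2, …, stop at -1) is carried as the Nat it stays equal to
def pvIncLoop (k n : Int) (node : List Int) : Nat → Bool × List Int
  | 0 =>
    match PySem.List.pyGet? node (0 : Int) with
    | none => (true, node)     -- Python raises IndexError here; outside Pre_ (k ≤ 0)
    | some x =>
      if x < n - 1 then
        (false, pvZeroTail k (0 : Int) (PySem.List.pySetD node (0 : Int) (x + 1)))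
      else (true, node)        -- i - 1 = -1: all_checked
  | i' + 1 =>
    match PySem.List.pyGet? node ((i' + 1 : Nat) : Int) with
    | none => (true, node)     -- Python raises IndexError here; outside Pre_ (k ≤ 0)
    | some x =>
      if x < n - 1 then
        (false, pvZeroTail k ((i' + 1 : Nat) : Int) (PySem.List.pySetD node ((i' + 1 : Nat) : Int) (x + 1)))
      else pvIncLoop k n node i'

def pvIncrementNode (k n : Int) (node : List Int) : Bool × List Int :=
  if k - 1 < 0 then (true, node)   -- Python's node[k-1] on the empty node raises; outside Pre_
  else pvIncLoop k n node (k - 1).toNat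

-- inner 'while j < k and permutation' of test_permutation ((k - j).toNat counts the steps left)
def pvTpInner (k : Int) (node : List Int) (i : Int) : Int → Nat → Bool
  | _, 0 => true
  | j, fuel + 1 =>
    if j < k then
      if PySem.List.pyGet? node i = PySem.List.pyGet? node j then false
      else pvTpInner k node i (j + 1) fuel
    else true

-- outer 'while i < k - 1 and permutation' of test_permutation
def pvTpOuter (k : Int) (node : List Int) : Int → Nat → Bool
  | _, 0 => true
  | i, fuel + 1 =>
    if i < k - 1 then
      if pvTpInner k node i (i + 1) (k - (i + 1)).toNat then pvTpOuter k node (i + 1) fuel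
      else false
    else true

def pvTestPermutation (k n : Int) (node : List Int) : Bool :=
  pvTpOuter k node 0 (k - 1).toNat

-- the 'while last_node == False' loop of alltoall_traffic; fuel only makes the recursion
-- well-founded — pvFuel iterations are always enough (each step strictly increases the
-- node read as a base-(max n k) number)
def pvMainLoop (k n : Int) : Nat → List Int → List (List Int) → List (List Int)
  | 0, _, acc => acc
  | fuel + 1, node, acc =>
    match pvIncrementNode k n node with
    | (true, _) => acc
    | (false, node') =>
      pvMainLoop k n fuel node'
        (if pvTestPermutation k n node' then acc ++ [node'] else acc)

def pvFuel (k n : Int) : Nat := (max n k).toNat ^ k.toNat + 2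

def alltoall_traffic (k : Int) (n : Int) : List (List Int) × List (List Int) :=
  -- node = []; for i in range(0, k): node.append(i); list_of_nodes = [node[:]]
  let node := (PySem.List.pyRange 0 k 1).foldl (fun nd i => nd ++ [i]) []
  let nodes := pvMainLoop k n (pvFuel k n) node [node]
  -- nested 'for source in list_of_nodes: for target in list_of_nodes: append to both'
  nodes.foldl
    (fun p s => nodes.foldl (fun q t => (q.1 ++ [s], q.2 ++ [t])) p)
    ([], [])

-- ===== PORT B =====

-- Source B's recursive helper 'perms(pool, r)'; the Nat argument is pool's length, on which
-- the recursion is structural (each recursive pool is one element shorter)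
def pvPermsAux : Nat → List Int → Int → List (List Int)
  | 0, _, r =>
    if r = 0 then [[]]
    else []            -- pool is empty: the comprehension ranges over nothing
  | len' + 1, pool, r =>
    if r = 0 then [[]]
    else
      (List.range pool.length).flatMap (fun i =>
        (pvPermsAux len' (pool.take i ++ pool.drop (i + 1)) (r - 1)).map
          (fun rest => pool.getD i 0 :: rest))

def pvPerms (pool : List Int) (r : Int) : List (List Int) :=
  pvPermsAux pool.length pool r

def alltoall_traffic_alt (k : Int) (n : Int) : List (List Int) × List (List Int) :=
  let initial : List Int := (List.range k.toNat).map Int.ofNat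
  let nodes := initial ::
    (pvPerms ((List.range n.toNat).map Int.ofNat) k).filter (fun p => p != initial)
  (nodes.flatMap (fun s => nodes.map (fun _ => s)),
   nodes.flatMap (fun _ => nodes.map (fun t => t)))

-- ===== PRECONDITION & SPEC =====
-- Pre_ excludes k ≤ 0, on which A raises IndexError (increment_node reads node[k-1] of the empty node list).
def Pre_alltoall_traffic (k : Int) (n : Int) : Prop := 1 ≤ k
instance (k : Int) (n : Int) : Decidable (Pre_alltoall_traffic k n) := by unfold Pre_alltoall_traffic; infer_instance
def pvWitness_alltoall_traffic : Int × Int := (2, 3)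

def Spec_alltoall_traffic (k : Int) (n : Int) (out : List (List Int) × List (List Int)) : Prop :=
  out = alltoall_traffic_alt k n
instance (k : Int) (n : Int) (out : List (List Int) × List (List Int)) : Decidable (Spec_alltoall_traffic k n out) := by unfold Spec_alltoall_traffic; infer_instance

-- ===== CLAIM (what is proved, stated in full; the proofs are below) =====
def Claim_equal_alltoall_traffic : Prop := ∀ (k : Int) (n : Int), Dom_alltoall_traffic k n → Pre_alltoall_traffic k n → Spec_alltoall_traffic k n (alltoall_traffic k n)

-- ===== LEMMAS AND PROOFS =====

-- ---------- proof-side vocabulary ----------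

-- all length-r words over digits 0..n-1, in A's enumeration (= lexicographic) order
def pvWords : Nat → Nat → List (List Int)
  | 0, _ => [[]]
  | r + 1, n => (List.range n).flatMap (fun d => (pvWords r n).map (fun w => ((d : Nat) : Int) :: w))

-- the lexicographic successor of a word over digits 0..n-1 (none = last word)
def pvSucc? (n : Int) : List Int → Option (List Int)
  | [] => none
  | d :: t =>
    match pvSucc? n t with
    | some t' => some (d :: t')
    | none => if d < n - 1 then some ((d + 1) :: t.map (fun _ => 0)) else none

def pvRamp (m : Int) (r : Nat) : List Int := (List.range r).map (fun j : Nat => m + (j : Int))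

-- ---------- pvWords basics ----------

theorem pvWords_mem {r n : Nat} {w : List Int} :
    w ∈ pvWords r n ↔ w.length = r ∧ ∀ x ∈ w, 0 ≤ x ∧ x < (n : Int) := by
  induction r generalizing w with
  | zero =>
    simp only [pvWords, List.mem_singleton]
    constructor
    · rintro rfl; simp
    · rintro ⟨hl, _⟩; exact List.length_eq_zero_iff.mp hl
  | succ r ih =>
    simp only [pvWords, List.mem_flatMap, List.mem_map, List.mem_range]
    constructor
    · rintro ⟨d, hd, t, ht, rfl⟩
      rcases ih.mp ht with ⟨hl, hb⟩
      refine ⟨by simp [hl], ?_⟩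
      intro x hx
      rcases List.mem_cons.mp hx with rfl | hx
      · exact ⟨Int.natCast_nonneg d, by exact_mod_cast hd⟩
      · exact hb x hx
    · rintro ⟨hl, hb⟩
      match w, hl with
      | x :: t, hl =>
        rcases hb x (by simp) with ⟨hx0, hxn⟩
        refine ⟨x.toNat, ?_, t, ih.mpr ⟨by simpa using hl, fun y hy => hb y (by simp [hy])⟩, ?_⟩
        · omega
        · simp [Int.toNat_of_nonneg hx0]

theorem pvWords_length {r n : Nat} : (pvWords r n).length = n ^ r := by
  induction r with
  | zero => simp [pvWords]
  | succ r ih =>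
    simp [pvWords, List.length_flatMap, ih, pow_succ, mul_comm]

theorem pvWords_ne_nil {r n : Nat} (hn : 0 < n) : pvWords r n ≠ [] := by
  intro h
  have h2 := pvWords_length (r := r) (n := n)
  rw [h] at h2
  have := pow_pos hn r
  simp at h2
  omega

theorem pvWords_head {r n : Nat} (hn : 0 < n) :
    (pvWords r n).head? = some (List.replicate r (0 : Int)) := by
  induction r with
  | zero => simp [pvWords]
  | succ r ih =>
    have h0 : List.range n = 0 :: (List.range (n - 1)).map Nat.succ := by
      conv_lhs => rw [show n = (n - 1) + 1 by omega, List.range_succ_eq_map]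
    rw [pvWords, h0]
    cases hw : pvWords r n with
    | nil => exact absurd hw (pvWords_ne_nil hn)
    | cons z zs =>
      rw [hw] at ih
      simp only [List.head?_cons, Option.some.injEq] at ih
      simp [hw, ih, List.replicate_succ]

theorem pvWords_getLast {r n : Nat} (hn : 0 < n) :
    (pvWords r n).getLast? = some (List.replicate r ((n : Int) - 1)) := by
  induction r with
  | zero => simp [pvWords]
  | succ r ih =>
    have h0 : List.range n = List.range (n - 1) ++ [n - 1] := by
      conv_lhs => rw [show n = (n - 1) + 1 by omega, List.range_succ]
    rw [pvWords, h0, List.flatMap_append]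
    have hne : (pvWords r n).map (fun w => (((n - 1 : Nat) : Int)) :: w) ≠ [] := by
      simp [pvWords_ne_nil hn]
    rw [List.getLast?_append_of_ne_nil _ (by simpa using hne)]
    simp only [List.flatMap_cons, List.flatMap_nil, List.append_nil]
    rw [List.getLast?_map, ih]
    simp [List.replicate_succ]
    push_cast [show (1:Nat) ≤ n from hn]; ring_nf

-- ---------- pvSucc? basics ----------

theorem pvSucc_none_of_allmax {n : Int} {w : List Int} (h : ∀ x ∈ w, x = n - 1) :
    pvSucc? n w = none := by
  induction w with
  | nil => rfl
  | cons d t ih =>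
    have hd : d = n - 1 := h d (by simp)
    simp [pvSucc?, ih (fun x hx => h x (by simp [hx])), hd]

theorem pvSucc_at {n : Int} (u : List Int) {d : Int} {v : List Int}
    (hv : ∀ x ∈ v, x = n - 1) (hd : d < n - 1) :
    pvSucc? n (u ++ d :: v) = some (u ++ (d + 1) :: v.map (fun _ => 0)) := by
  induction u with
  | nil => simp [pvSucc?, pvSucc_none_of_allmax hv, hd]
  | cons a u ih => simp [pvSucc?, ih]

theorem pvSucc_lt {n : Int} {w w' : List Int} (h : pvSucc? n w = some w') : w < w' := by
  induction w generalizing w' with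
  | nil => simp [pvSucc?] at h
  | cons d t ih =>
    simp only [pvSucc?] at h
    cases hs : pvSucc? n t with
    | some t' =>
      rw [hs] at h
      cases h
      exact List.cons_lt_cons_iff.mpr (Or.inr ⟨rfl, ih hs⟩)
    | none =>
      rw [hs] at h
      split_ifs at h with hd
      · cases h
        exact List.cons_lt_cons_iff.mpr (Or.inl (by omega))

-- ---------- order structure of pvWords ----------

theorem pvChainAux {r n : Nat} (hn : 0 < n)
    (ihc : List.IsChain (fun a b => pvSucc? (n : Int) a = some b) (pvWords r n)) :
    ∀ (b a : Nat), a + b ≤ n →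
      List.IsChain (fun a b => pvSucc? (n : Int) a = some b)
        ((List.range' a b).flatMap (fun d => (pvWords r n).map (fun w => ((d : Nat) : Int) :: w))) := by
  intro b
  induction b with
  | zero => intro a _; simp
  | succ b ihb =>
    intro a hab
    rw [List.range'_succ, List.flatMap_cons]
    rw [List.isChain_append]
    refine ⟨?_, ihb (a + 1) (by omega), ?_⟩
    · exact List.isChain_map_of_isChain _ (fun x y hxy => by simp [pvSucc?, hxy]) ihc
    · intro x hx y hy
      -- x is the last of block a, y the head of block (a+1); b > 0 forced
      match b, hab with
      | b + 1, hab =>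
        rw [List.getLast?_map, pvWords_getLast hn] at hx
        simp only [Option.map_some, Option.mem_def, Option.some.injEq] at hx
        rw [List.range'_succ, List.flatMap_cons, List.head?_append, List.head?_map,
          pvWords_head hn] at hy
        simp only [Option.map_some, Option.some_or, Option.mem_def, Option.some.injEq] at hy
        subst hx hy
        have hsa : ((a : Int)) < (n : Int) - 1 := by
          have : a + 2 ≤ n := by omega
          omega
        have := pvSucc_at (n := (n : Int)) [] (d := (a : Int))
          (v := List.replicate r ((n : Int) - 1)) (by simp) hsa
        simpa [List.map_replicate, pvSucc?] using this

theorem pvWords_chain {r n : Nat} (hn : 0 < n) :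
    List.IsChain (fun a b => pvSucc? (n : Int) a = some b) (pvWords r n) := by
  induction r with
  | zero => simp [pvWords]
  | succ r ih =>
    have := pvChainAux hn ih n 0 (by omega)
    simpa [pvWords, List.range_eq_range'] using this

theorem pvWords_pairwise {r n : Nat} (hn : 0 < n) :
    (pvWords r n).Pairwise (· < ·) := by
  have h := (pvWords_chain (r := r) hn).imp (fun {a b} hab => pvSucc_lt hab)
  exact h.pairwise

theorem pvWords_nodup {r n : Nat} (hn : 0 < n) : (pvWords r n).Nodup := by
  refine (pvWords_pairwise hn).imp ?_
  intro a b hab h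
  subst h
  exact List.lt_irrefl a hab

-- ---------- increment_node computes pvSucc? ----------

theorem pvZeroTail_spec : ∀ (m : Nat), ∀ (i : Nat) (nd : List Int), i + m < nd.length →
    (PySem.List.pyRange ((i + m : Nat) : Int) (i : Int) (-1)).foldl
        (fun nd j => PySem.List.pySetD nd j 0) nd
      = nd.take (i + 1) ++ List.replicate m 0 ++ nd.drop (i + m + 1) := by
  intro m
  induction m with
  | zero =>
    intro i nd _
    rw [show ((i + 0 : Nat) : Int) = (i : Int) by norm_num,
      PySem.List.pyRange_neg_one_eq_nil (le_refl _)]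
    simp
  | succ m ih =>
    intro i nd hlen
    have hcons : PySem.List.pyRange ((i + (m + 1) : Nat) : Int) (i : Int) (-1)
        = ((i + (m + 1) : Nat) : Int) :: PySem.List.pyRange ((i + m : Nat) : Int) (i : Int) (-1) := by
      rw [PySem.List.pyRange_neg_one_cons (by exact_mod_cast Nat.lt_add_of_pos_right m.succ_pos)]
      congr 1
      push_cast
      ring
    rw [hcons, List.foldl_cons, PySem.List.pySetD_natCast]
    have hlt : i + (m + 1) < nd.length := hlen
    have hih := ih i (nd.set (i + (m + 1)) 0) (by rw [List.length_set]; omega)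
    rw [hih]
    have hA : (nd.set (i + (m + 1)) 0).take (i + 1) = nd.take (i + 1) :=
      List.take_set_of_le (by omega)
    have hB : (nd.set (i + (m + 1)) 0).drop (i + m + 1) = (0 : Int) :: nd.drop (i + (m + 1) + 1) := by
      rw [show i + m + 1 = i + (m + 1) by omega]
      rw [List.set_eq_take_cons_drop _ hlt, List.drop_append]
      rw [List.length_take_of_le (by omega), List.drop_take]
      simp
    rw [hA, hB]
    rw [show List.replicate (m + 1) (0 : Int) = List.replicate m 0 ++ [0] from List.replicate_succ' ..]
    simp [List.append_assoc]

theorem pvZeroTail_result {k : Int} {w : List Int} (hkl : k = (w.length : Int))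
    {i : Nat} (hi : i < w.length) (v : Int) :
    pvZeroTail k ((i : Nat) : Int) (PySem.List.pySetD w ((i : Nat) : Int) v)
      = w.take i ++ v :: List.replicate (w.length - 1 - i) 0 := by
  rw [PySem.List.pySetD_natCast]
  set nd := w.set i v with hnd
  have hndlen : nd.length = w.length := by simp [hnd]
  have hk1 : k - 1 = ((i + (w.length - 1 - i) : Nat) : Int) := by
    rw [hkl]; omega
  rw [pvZeroTail, hk1, pvZeroTail_spec (w.length - 1 - i) i nd (by omega)]
  have hdz : nd.drop (i + (w.length - 1 - i) + 1) = [] := by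
    apply List.drop_eq_nil_of_le
    omega
  have hsetd : nd = w.take i ++ v :: w.drop (i + 1) :=
    List.set_eq_take_cons_drop _ hi
  have htk : nd.take (i + 1) = w.take i ++ [v] := by
    rw [hsetd, List.take_append]
    have hl : (w.take i).length = i := List.length_take_of_le (by omega)
    rw [hl, List.take_of_length_le (by rw [hl]; omega)]
    congr 1
    rw [show i + 1 - i = 1 by omega]
    simp
  rw [hdz, htk]
  simp

theorem pvIncLoop_branch {n : Nat} {k : Int} {w : List Int}
    (hkl : k = (w.length : Int)) (i : Nat) (hi : i < w.length)
    (hsuf : ∀ j (hj : j < w.length), i < j → w[j] = (n : Int) - 1)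
    (hlt : w[i] < (n : Int) - 1) :
    pvSucc? (n : Int) w
        = some (w.take i ++ (w[i] + 1) :: List.replicate (w.length - 1 - i) 0)
      ∧ pvZeroTail k ((i : Nat) : Int) (PySem.List.pySetD w ((i : Nat) : Int) (w[i] + 1))
        = w.take i ++ (w[i] + 1) :: List.replicate (w.length - 1 - i) 0 := by
  have hdrop : ∀ x ∈ w.drop (i + 1), x = (n : Int) - 1 := by
    intro x hx
    rcases List.mem_iff_getElem.mp hx with ⟨j, hj, rfl⟩
    rw [List.getElem_drop]
    exact hsuf (i + 1 + j) (by simp at hj; omega) (by omega)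
  have hw : w = w.take i ++ w[i] :: w.drop (i + 1) := by
    conv_lhs => rw [← List.take_append_drop i w, List.drop_eq_getElem_cons hi]
  have hmap : (w.drop (i + 1)).map (fun _ => (0 : Int))
      = List.replicate (w.length - 1 - i) 0 := by
    rw [List.map_const']
    congr 1
    simp
    omega
  constructor
  · conv_lhs => rw [hw]
    rw [pvSucc_at _ hdrop hlt, hmap]
  · exact pvZeroTail_result hkl hi _

theorem pvIncLoop_spec {n : Nat} {k : Int} {w : List Int}
    (hkl : k = (w.length : Int)) (hin : ∀ x ∈ w, 0 ≤ x ∧ x < (n : Int)) :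
    ∀ (i : Nat), i < w.length → (∀ j (hj : j < w.length), i < j → w[j] = (n : Int) - 1) →
      pvIncLoop k (n : Int) w i
        = match pvSucc? (n : Int) w with
          | none => (true, w)
          | some w' => (false, w') := by
  intro i
  induction i with
  | zero =>
    intro hi hsuf
    simp only [pvIncLoop, PySem.List.pyGet?_zero, List.getElem?_eq_getElem hi]
    by_cases hlt : w[0] < (n : Int) - 1
    · rw [if_pos hlt]
      have := pvIncLoop_branch (n := n) (k := k) (w := w) hkl 0 hi hsuf hlt
      rw [this.1]
      simpa using this.2
    · rw [if_neg hlt]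
      have hall : ∀ x ∈ w, x = (n : Int) - 1 := by
        intro x hx
        rcases List.mem_iff_getElem.mp hx with ⟨j, hj, rfl⟩
        rcases Nat.eq_zero_or_pos j with rfl | hjp
        · have := hin w[0] (List.getElem_mem hi)
          omega
        · exact hsuf j hj hjp
      rw [pvSucc_none_of_allmax hall]
  | succ i ih =>
    intro hi hsuf
    simp only [pvIncLoop, PySem.List.pyGet?_natCast, List.getElem?_eq_getElem hi]
    by_cases hlt : w[i + 1] < (n : Int) - 1
    · rw [if_pos hlt]
      have := pvIncLoop_branch (n := n) (k := k) (w := w) hkl (i + 1) hi hsuf hlt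
      rw [this.1]
      simpa using this.2
    · rw [if_neg hlt]
      exact ih (by omega) (fun j hj hij => by
        by_cases hje : j = i + 1
        · subst hje
          have := hin w[i + 1] (List.getElem_mem hj)
          omega
        · exact hsuf j hj (by omega))

theorem pvIncrementNode_spec {n : Nat} {w : List Int} (hw : 0 < w.length)
    (hin : ∀ x ∈ w, 0 ≤ x ∧ x < (n : Int)) :
    pvIncrementNode ((w.length : Nat) : Int) (n : Int) w
      = match pvSucc? (n : Int) w with
        | none => (true, w)
        | some w' => (false, w') := by
  rw [pvIncrementNode, if_neg (by omega)]
  rw [show (((w.length : Nat) : Int) - 1).toNat = w.length - 1 by omega]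
  exact pvIncLoop_spec rfl hin (w.length - 1) (by omega) (fun j hj hij => by omega)

theorem pvIncLoop_none {n k : Int} {w : List Int} :
    ∀ (a : Nat), a < w.length → (∀ j (hj : j < w.length), j ≤ a → ¬ w[j] < n - 1) →
      pvIncLoop k n w a = (true, w) := by
  intro a
  induction a with
  | zero =>
    intro ha hall
    simp only [pvIncLoop, PySem.List.pyGet?_zero, List.getElem?_eq_getElem ha]
    rw [if_neg (hall 0 ha (by omega))]
  | succ a ih =>
    intro ha hall
    simp only [pvIncLoop, PySem.List.pyGet?_natCast, List.getElem?_eq_getElem ha]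
    rw [if_neg (hall (a + 1) ha (by omega))]
    exact ih (by omega) (fun j hj hja => hall j hj (by omega))

theorem pvIncLoop_find {n k : Int} {w : List Int} (hkl : k = (w.length : Int)) :
    ∀ (a : Nat), a < w.length → ∀ (i : Nat) (hi : i < w.length), i ≤ a → w[i] < n - 1 →
      (∀ j (hj : j < w.length), i < j → j ≤ a → ¬ w[j] < n - 1) →
      pvIncLoop k n w a
        = (false, w.take i ++ (w[i] + 1) :: List.replicate (w.length - 1 - i) 0) := by
  intro a
  induction a with
  | zero =>
    intro ha i hi hia hlt _
    have hi0 : i = 0 := by omega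
    subst hi0
    simp only [pvIncLoop, PySem.List.pyGet?_zero, List.getElem?_eq_getElem ha]
    rw [if_pos hlt]
    have := pvZeroTail_result (w := w) hkl hi (w[0] + 1)
    simp only [Nat.cast_zero] at this
    rw [this]
  | succ a ih =>
    intro ha i hi hia hlt hall
    simp only [pvIncLoop, PySem.List.pyGet?_natCast, List.getElem?_eq_getElem ha]
    by_cases hie : i = a + 1
    · subst hie
      rw [if_pos hlt]
      rw [pvZeroTail_result (w := w) hkl hi (w[a + 1] + 1)]
    · rw [if_neg (hall (a + 1) ha (by omega) (by omega))]
      exact ih (by omega) i hi (by omega) hlt (fun j hj hij hja => hall j hj hij (by omega))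

theorem pvRamp_getElem (m : Int) (r i : Nat) (h : i < (pvRamp m r).length) :
    (pvRamp m r)[i] = m + (i : Int) := by
  simp [pvRamp]

theorem pvRamp_take (m : Int) (r i : Nat) (h : i ≤ r) : (pvRamp m r).take i = pvRamp m i := by
  rw [pvRamp, pvRamp, ← List.map_take, List.take_range, min_eq_left h]

-- ---------- test_permutation decides Nodup ----------

theorem pvTpInner_spec {k : Int} {w : List Int} (hk : k = (w.length : Int)) (iI : Int) :
    ∀ (fuel : Nat) (j : Int), 0 ≤ j → fuel = (k - j).toNat →
      (pvTpInner k w iI j fuel = true ↔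
        ∀ jj : Nat, j ≤ (jj : Int) → jj < w.length →
          PySem.List.pyGet? w iI ≠ PySem.List.pyGet? w ((jj : Nat) : Int)) := by
  intro fuel
  induction fuel with
  | zero =>
    intro j hj0 hfe
    constructor
    · intro _ jj hjj hjl
      exact absurd hjl (by omega)
    · intro _; rfl
  | succ fuel ih =>
    intro j hj0 hfe
    have hjk : j < k := by omega
    simp only [pvTpInner, if_pos hjk]
    by_cases heq : PySem.List.pyGet? w iI = PySem.List.pyGet? w j
    · rw [if_pos heq]
      simp only [Bool.false_eq_true, false_iff, not_forall]
      refine ⟨j.toNat, by omega, by omega, not_not_intro ?_⟩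
      rw [show ((j.toNat : Nat) : Int) = j by omega]
      exact heq
    · rw [if_neg heq]
      rw [ih (j + 1) (by omega) (by omega)]
      constructor
      · intro hall jj hjj hjl
        by_cases hje : (jj : Int) = j
        · rw [hje]; exact heq
        · exact hall jj (by omega) hjl
      · intro hall jj hjj hjl
        exact hall jj (by omega) hjl

theorem pvTpOuter_spec {k : Int} {w : List Int} (hk : k = (w.length : Int)) :
    ∀ (fuel : Nat) (i : Int), 0 ≤ i → fuel = (k - 1 - i).toNat →
      (pvTpOuter k w i fuel = true ↔
        ∀ ii jj : Nat, i ≤ (ii : Int) → ii < jj → jj < w.length →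
          PySem.List.pyGet? w ((ii : Nat) : Int) ≠ PySem.List.pyGet? w ((jj : Nat) : Int)) := by
  intro fuel
  induction fuel with
  | zero =>
    intro i hi0 hfe
    constructor
    · intro _ ii jj hii hij hjl
      exact absurd hjl (by omega)
    · intro _; rfl
  | succ fuel ih =>
    intro i hi0 hfe
    have hik : i < k - 1 := by omega
    simp only [pvTpOuter, if_pos hik]
    have hspec := pvTpInner_spec hk i (k - (i + 1)).toNat (i + 1) (by omega) rfl
    by_cases hb : pvTpInner k w i (i + 1) (k - (i + 1)).toNat = true
    · rw [if_pos hb, ih (i + 1) (by omega) (by omega)]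
      have hinner := hspec.mp hb
      constructor
      · intro hall ii jj hii hij hjl
        by_cases hie : (ii : Int) = i
        · rw [hie]; exact hinner jj (by omega) hjl
        · exact hall ii jj (by omega) hij hjl
      · intro hall ii jj hii hij hjl
        exact hall ii jj (by omega) hij hjl
    · rw [if_neg hb]
      simp only [Bool.false_eq_true, false_iff, not_forall]
      have hni : ¬ ∀ jj : Nat, i + 1 ≤ (jj : Int) → jj < w.length →
          PySem.List.pyGet? w i ≠ PySem.List.pyGet? w ((jj : Nat) : Int) :=
        fun hc => hb (hspec.mpr hc)
      rcases not_forall.mp hni with ⟨jj, hjj⟩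
      rcases Classical.not_imp.mp hjj with ⟨h1, hjj⟩
      rcases Classical.not_imp.mp hjj with ⟨h2, hjj⟩
      refine ⟨i.toNat, jj, by omega, by omega, h2, ?_⟩
      rw [show ((i.toNat : Nat) : Int) = i by omega]
      exact hjj

theorem pvTestPermutation_spec {nI : Int} {w : List Int} :
    pvTestPermutation ((w.length : Nat) : Int) nI w = decide w.Nodup := by
  have h := pvTpOuter_spec (k := ((w.length : Nat) : Int)) (w := w) rfl
    (((w.length : Nat) : Int) - 1 - 0).toNat 0 (by omega) rfl
  have hnd : w.Nodup ↔ ∀ ii jj : Nat, (0 : Int) ≤ (ii : Int) → ii < jj → jj < w.length →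
      PySem.List.pyGet? w ((ii : Nat) : Int) ≠ PySem.List.pyGet? w ((jj : Nat) : Int) := by
    rw [List.nodup_iff_getElem?_ne_getElem?]
    constructor
    · intro hh ii jj _ h1 h2
      simpa [PySem.List.pyGet?_natCast] using hh ii jj h1 h2
    · intro hh ii jj h1 h2
      simpa [PySem.List.pyGet?_natCast] using hh ii jj (by omega) h1 h2
  rw [pvTestPermutation]
  rw [show (((w.length : Nat) : Int) - 1).toNat = (((w.length : Nat) : Int) - 1 - 0).toNat by omega]
  by_cases hp : w.Nodup
  · rw [h.mpr (hnd.mp hp)]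
    simp [hp]
  · have : ¬ pvTpOuter ((w.length : Nat) : Int) w 0 (((w.length : Nat) : Int) - 1 - 0).toNat = true := by
      intro hc
      exact hp (hnd.mpr (h.mp hc))
    simp only [Bool.not_eq_true] at this
    rw [this]
    simp [hp]

-- ---------- the main while loop walks pvWords and filters permutations ----------

theorem pvMainLoop_spec {k n : Nat} (hk : 0 < k) (hn : 0 < n) :
    ∀ (l₂ l₁ : List (List Int)) (w : List Int) (acc : List (List Int)) (fuel : Nat),
      pvWords k n = l₁ ++ w :: l₂ → l₂.length < fuel →
      pvMainLoop ((k : Nat) : Int) ((n : Nat) : Int) fuel w acc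
        = acc ++ l₂.filter (fun v => decide v.Nodup) := by
  intro l₂
  induction l₂ with
  | nil =>
    intro l₁ w acc fuel hsplit hfuel
    obtain ⟨f, rfl⟩ : ∃ f, fuel = f + 1 := ⟨fuel - 1, by omega⟩
    have hwm : w ∈ pvWords k n := by rw [hsplit]; simp
    rcases pvWords_mem.mp hwm with ⟨hlen, hin⟩
    have hlast : w = List.replicate k ((n : Int) - 1) := by
      have h1 := pvWords_getLast (r := k) (n := n) hn
      rw [hsplit, List.getLast?_concat] at h1
      exact Option.some.injEq .. ▸ (by simpa using h1)
    have hsucc : pvSucc? ((n : Nat) : Int) w = none := by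
      apply pvSucc_none_of_allmax
      intro x hx
      rw [hlast] at hx
      exact List.eq_of_mem_replicate hx
    have hinc : pvIncrementNode ((k : Nat) : Int) ((n : Nat) : Int) w = (true, w) := by
      rw [show ((k : Nat) : Int) = ((w.length : Nat) : Int) by rw [hlen]]
      rw [pvIncrementNode_spec (by omega) hin, hsucc]
    simp [pvMainLoop, hinc]
  | cons w' l₂ ih =>
    intro l₁ w acc fuel hsplit hfuel
    obtain ⟨f, rfl⟩ : ∃ f, fuel = f + 1 := ⟨fuel - 1, by omega⟩
    have hwm : w ∈ pvWords k n := by rw [hsplit]; simp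
    have hwm' : w' ∈ pvWords k n := by rw [hsplit]; simp
    rcases pvWords_mem.mp hwm with ⟨hlen, hin⟩
    rcases pvWords_mem.mp hwm' with ⟨hlen', _⟩
    have hchain := pvWords_chain (r := k) (n := n) hn
    rw [hsplit] at hchain
    have hsucc : pvSucc? ((n : Nat) : Int) w = some w' :=
      ((List.isChain_append.mp hchain).2.1).rel
    have hinc : pvIncrementNode ((k : Nat) : Int) ((n : Nat) : Int) w = (false, w') := by
      rw [show ((k : Nat) : Int) = ((w.length : Nat) : Int) by rw [hlen]]
      rw [pvIncrementNode_spec (by omega) hin, hsucc]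
    have htest : pvTestPermutation ((k : Nat) : Int) ((n : Nat) : Int) w' = decide w'.Nodup := by
      rw [show ((k : Nat) : Int) = ((w'.length : Nat) : Int) by rw [hlen']]
      exact pvTestPermutation_spec
    have hrec := ih (l₁ ++ [w]) w' (if decide w'.Nodup then acc ++ [w'] else acc) f
      (by rw [hsplit]; simp) (by simp only [List.length_cons] at hfuel; omega)
    simp only [pvMainLoop, hinc, htest]
    rw [hrec]
    by_cases hnd : w'.Nodup
    · simp [hnd, List.filter_cons]
    · simp [hnd, List.filter_cons]

-- ---------- the initial node is the first permutation word ----------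

theorem pvRamp_succ (m : Int) (r : Nat) : pvRamp m (r + 1) = m :: pvRamp (m + 1) r := by
  rw [pvRamp, List.range_succ_eq_map, List.map_cons, List.map_map]
  refine congrArg₂ _ (by simp) ?_
  rw [pvRamp]
  apply List.map_congr_left
  intro j _
  simp only [Function.comp_apply]
  push_cast
  ring

theorem pvRamp_length (m : Int) (r : Nat) : (pvRamp m r).length = r := by simp [pvRamp]

theorem pvRamp_nodup (m : Int) (r : Nat) : (pvRamp m r).Nodup := by
  rw [pvRamp]
  refine List.Nodup.map ?_ List.nodup_range
  intro a b hab
  have : m + (a : Int) = m + (b : Int) := hab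
  omega

theorem pvLexMin : ∀ (w : List Int) (m : Int), w.Nodup → (∀ x ∈ w, m ≤ x) →
    ¬ (w < pvRamp m w.length) := by
  intro w
  induction w with
  | nil =>
    intro m _ _
    simp only [List.length_nil, pvRamp, List.range_zero, List.map_nil]
    exact List.lt_irrefl []
  | cons a t ih =>
    intro m hnd hge h
    rw [List.length_cons, pvRamp_succ] at h
    rcases List.cons_lt_cons_iff.mp h with hlt | ⟨ha, hlt⟩
    · exact absurd hlt (by have := hge a (by simp); omega)
    · subst ha
      refine ih (a + 1) (List.Nodup.of_cons hnd) ?_ hlt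
      intro x hx
      have h1 := hge x (by simp [hx])
      have h2 : x ≠ a := fun hc => (List.nodup_cons.mp hnd).1 (hc ▸ hx)
      omega

theorem pvWordsSplit {k n : Nat} (hk : 0 < k) (hkn : k ≤ n) :
    ∃ l₁ l₂ : List (List Int), pvWords k n = l₁ ++ pvRamp 0 k :: l₂
      ∧ l₁.filter (fun v => decide v.Nodup) = [] := by
  have hn : 0 < n := by omega
  have hmem : pvRamp 0 k ∈ pvWords k n := by
    refine pvWords_mem.mpr ⟨pvRamp_length 0 k, ?_⟩
    intro x hx
    rcases List.mem_map.mp hx with ⟨j, hj, rfl⟩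
    simp at hj ⊢
    omega
  obtain ⟨l₁, l₂, hsplit⟩ := List.append_of_mem hmem
  refine ⟨l₁, l₂, hsplit, ?_⟩
  rw [List.filter_eq_nil_iff]
  intro w hw
  simp only [decide_eq_true_eq]
  intro hnd
  have hlt : w < pvRamp 0 k := by
    have hpw := pvWords_pairwise (r := k) (n := n) hn
    rw [hsplit] at hpw
    exact (List.pairwise_append.mp hpw).2.2 w hw (pvRamp 0 k) (by simp)
  have hwmem : w ∈ pvWords k n := by rw [hsplit]; simp [hw]
  rcases pvWords_mem.mp hwmem with ⟨hwl, hwb⟩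
  exact pvLexMin w 0 hnd (fun x hx => (hwb x hx).1) (by rw [hwl]; exact hlt)

-- ---------- B's backtracking generator emits the filtered words ----------

def pvRangeMap (n : Nat) : List Int := (List.range n).map (fun j : Nat => (j : Int))

theorem pvRangeMap_nodup (n : Nat) : (pvRangeMap n).Nodup := by
  rw [pvRangeMap]
  refine List.Nodup.map ?_ List.nodup_range
  intro a b hab
  have : (a : Int) = (b : Int) := hab
  omega

theorem pvRangeMap_mem {n : Nat} {x : Int} : x ∈ pvRangeMap n ↔ 0 ≤ x ∧ x < (n : Int) := by
  rw [pvRangeMap]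
  constructor
  · intro hx
    rcases List.mem_map.mp hx with ⟨j, hj, rfl⟩
    simp at hj
    omega
  · intro ⟨h0, hn⟩
    exact List.mem_map.mpr ⟨x.toNat, by simp; omega⟩

theorem pvNoPerm {k n : Nat} (h : n < k) {w : List Int} (hw : w ∈ pvWords k n) :
    ¬ w.Nodup := by
  intro hnd
  rcases pvWords_mem.mp hw with ⟨hl, hb⟩
  have hsub : w ⊆ pvRangeMap n := fun x hx => pvRangeMap_mem.mpr (hb x hx)
  have hle := List.Subperm.length_le (List.subperm_of_subset hnd hsub)
  rw [hl] at hle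
  simp [pvRangeMap] at hle
  omega

theorem pvSubFlat {α β : Type} [DecidableEq α] {l pool : List α} (f : α → List β)
    (hsub : pool.Sublist l) (hnd : l.Nodup) :
    l.flatMap (fun d => if d ∈ pool then f d else []) = pool.flatMap f := by
  induction hsub with
  | slnil => rfl
  | cons a hs ih =>
    rw [List.flatMap_cons]
    rw [if_neg (fun hc => (List.nodup_cons.mp hnd).1 (hs.subset hc))]
    simpa using ih (List.nodup_cons.mp hnd).2
  | cons₂ a hs ih =>
    rw [List.flatMap_cons, List.flatMap_cons, if_pos List.mem_cons_self]
    congr 1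
    rw [← ih (List.nodup_cons.mp hnd).2]
    apply List.flatMap_congr
    intro d hd
    have hda : d ≠ a := fun hc => (List.nodup_cons.mp hnd).1 (hc ▸ hd)
    simp [List.mem_cons, hda]

theorem pvIdxFlatMap : ∀ (pool : List Int), pool.Nodup →
    ∀ (F : Int → List Int → List (List Int)),
      (List.range pool.length).flatMap
          (fun i => F (pool.getD i 0) (pool.take i ++ pool.drop (i + 1)))
        = pool.flatMap (fun d => F d (pool.erase d)) := by
  intro pool
  induction pool with
  | nil => intro _ F; simp
  | cons p ps ih =>
    intro hnd F
    rw [List.length_cons, List.range_succ_eq_map, List.flatMap_cons, List.flatMap_map]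
    have h1 : ∀ j ∈ List.range ps.length,
        F ((p :: ps).getD (j + 1) 0) ((p :: ps).take (j + 1) ++ (p :: ps).drop (j + 1 + 1))
          = F (ps.getD j 0) (p :: (ps.take j ++ ps.drop (j + 1))) := by
      intro j _
      rw [List.getD_cons_succ, List.take_succ_cons, List.drop_succ_cons, List.cons_append]
    rw [List.flatMap_congr h1]
    rw [ih (List.nodup_cons.mp hnd).2 (fun d l => F d (p :: l))]
    rw [List.flatMap_cons, List.erase_cons_head]
    simp only [List.take_zero, List.nil_append]
    congr 1
    apply List.flatMap_congr
    intro d hd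
    have hdp : d ≠ p := fun hc => (List.nodup_cons.mp hnd).1 (hc ▸ hd)
    rw [List.erase_cons_tail (by simpa using fun hc => hdp hc.symm)]

theorem pvPermsAux_spec {n : Nat} :
    ∀ (r : Nat) (pool : List Int), pool.Sublist (pvRangeMap n) →
      pvPermsAux pool.length pool ((r : Nat) : Int)
        = (pvWords r n).filter (fun w => decide (w.Nodup ∧ ∀ x ∈ w, x ∈ pool)) := by
  intro r
  induction r with
  | zero =>
    intro pool _
    cases pool with
    | nil => rw [show ([] : List Int).length = 0 from rfl, pvPermsAux]; simp [pvWords]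
    | cons p ps => rw [List.length_cons, pvPermsAux]; simp [pvWords]
  | succ r ih =>
    intro pool hsub
    have hpnd : pool.Nodup := hsub.nodup (pvRangeMap_nodup n)
    cases pool with
    | nil =>
      rw [show ([] : List Int).length = 0 from rfl, pvPermsAux, if_neg (by omega)]
      symm
      rw [List.filter_eq_nil_iff]
      intro w hw
      rcases pvWords_mem.mp hw with ⟨hwl, _⟩
      match w, hwl with
      | x :: t, _ =>
        intro hc
        simp only [decide_eq_true_eq] at hc
        exact absurd (hc.2 x (by simp)) (List.not_mem_nil)
    | cons p ps =>
      rw [List.length_cons, pvPermsAux, if_neg (by omega)]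
      have harg : ∀ i ∈ List.range (p :: ps).length,
          (pvPermsAux ps.length ((p :: ps).take i ++ (p :: ps).drop (i + 1))
              (((r + 1 : Nat) : Int) - 1)).map
              (fun rest => (p :: ps).getD i 0 :: rest)
            = (pvPermsAux ((p :: ps).take i ++ (p :: ps).drop (i + 1)).length
                ((p :: ps).take i ++ (p :: ps).drop (i + 1)) ((r : Nat) : Int)).map
              (fun rest => (p :: ps).getD i 0 :: rest) := by
        intro i hi
        have hl2 : ((p :: ps).take i ++ (p :: ps).drop (i + 1)).length = ps.length := by
          simp only [List.length_append, List.length_take, List.length_drop, List.length_cons]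
          simp at hi
          omega
        rw [hl2]
        norm_num
      rw [List.flatMap_congr harg]
      rw [pvIdxFlatMap (p :: ps) hpnd
        (fun d l => (pvPermsAux l.length l ((r : Nat) : Int)).map (fun rest => d :: rest))]
      have hih : ∀ d ∈ (p :: ps),
          (pvPermsAux ((p :: ps).erase d).length ((p :: ps).erase d) ((r : Nat) : Int)).map
              (fun rest => d :: rest)
            = ((pvWords r n).filter
                (fun w => decide (w.Nodup ∧ ∀ x ∈ w, x ∈ (p :: ps).erase d))).map
              (fun rest => d :: rest) := by
        intro d _
        rw [ih ((p :: ps).erase d) ((List.erase_sublist ..).trans hsub)]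
      rw [List.flatMap_congr hih]
      rw [show pvWords (r + 1) n
          = (List.range n).flatMap (fun d => (pvWords r n).map (fun w => ((d : Nat) : Int) :: w))
          from rfl]
      rw [List.filter_flatMap]
      have hrhs : ∀ d ∈ List.range n,
          ((pvWords r n).map (fun w => ((d : Nat) : Int) :: w)).filter
              (fun w => decide (w.Nodup ∧ ∀ x ∈ w, x ∈ (p :: ps)))
            = (if ((d : Nat) : Int) ∈ (p :: ps) then
                ((pvWords r n).filter
                  (fun w => decide (w.Nodup ∧ ∀ x ∈ w, x ∈ (p :: ps).erase ((d : Nat) : Int)))).map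
                  (fun w => ((d : Nat) : Int) :: w)
              else []) := by
        intro d _
        set dI : Int := ((d : Nat) : Int) with hdI
        rw [List.filter_map]
        by_cases hdp : dI ∈ (p :: ps)
        · rw [if_pos hdp]
          congr 1
          apply List.filter_congr
          intro w _
          simp only [Function.comp_apply, decide_eq_decide, List.nodup_cons]
          constructor
          · rintro ⟨⟨hdw, hwnd⟩, hmem⟩
            refine ⟨hwnd, ?_⟩
            intro x hx
            exact (List.Nodup.mem_erase_iff hpnd).mpr
              ⟨fun hc => hdw (hc ▸ hx), hmem x (by simp [hx])⟩
          · rintro ⟨hwnd, hmem⟩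
            refine ⟨⟨?_, hwnd⟩, ?_⟩
            · intro hc
              have := (List.Nodup.mem_erase_iff hpnd).mp (hmem dI hc)
              exact this.1 rfl
            · intro x hx
              rcases List.mem_cons.mp hx with rfl | hx
              · exact hdp
              · exact ((List.Nodup.mem_erase_iff hpnd).mp (hmem x hx)).2
        · rw [if_neg hdp]
          rw [List.map_eq_nil_iff, List.filter_eq_nil_iff]
          intro w _
          simp only [Function.comp_apply, decide_eq_true_eq, not_and]
          intro _ hmem
          exact absurd (hmem dI (by simp)) hdp
      rw [List.flatMap_congr hrhs]
      have hfin := pvSubFlat (l := pvRangeMap n) (pool := (p :: ps))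
        (f := fun dI => ((pvWords r n).filter
            (fun w => decide (w.Nodup ∧ ∀ x ∈ w, x ∈ (p :: ps).erase dI))).map
          (fun w => dI :: w)) hsub (pvRangeMap_nodup n)
      rw [pvRangeMap, List.flatMap_map] at hfin
      rw [hfin]

-- ---------- cross product: both nested-loop shapes produce the same pair ----------

theorem pvCrossInner (nodes : List (List Int)) (s : List Int) :
    ∀ (a b : List (List Int)),
      nodes.foldl (fun q t => (q.1 ++ [s], q.2 ++ [t])) (a, b)
        = (a ++ nodes.map (fun _ => s), b ++ nodes) := by
  induction nodes with
  | nil => intro a b; simp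
  | cons c cs ih =>
    intro a b
    rw [List.foldl_cons, ih]
    simp

theorem pvCrossOuter (nodes : List (List Int)) :
    ∀ (l : List (List Int)) (a b : List (List Int)),
      l.foldl (fun p s => nodes.foldl (fun q t => (q.1 ++ [s], q.2 ++ [t])) p) (a, b)
        = (a ++ l.flatMap (fun s => nodes.map (fun _ => s)), b ++ l.flatMap (fun _ => nodes)) := by
  intro l
  induction l with
  | nil => intro a b; simp
  | cons s ss ih =>
    intro a b
    rw [List.foldl_cons, pvCrossInner, ih]
    simp

-- ---------- no k-permutation of fewer than k nodes exists ----------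

theorem pvPermsAux_nil : ∀ (len : Nat) (pool : List Int) (r : Int),
    (len : Int) < r → pvPermsAux len pool r = [] := by
  intro len
  induction len with
  | zero =>
    intro pool r hr
    rw [pvPermsAux, if_neg (by omega)]
  | succ len ih =>
    intro pool r hr
    rw [pvPermsAux, if_neg (by omega)]
    apply List.flatMap_eq_nil_iff.mpr
    intro i _
    rw [ih _ (r - 1) (by push_cast at hr ⊢; omega)]
    simp

-- ---------- the two programs agree for every k ≥ 1 ----------

theorem pvAgreeNat (k' n' : Nat) (hk : 1 ≤ k') :
    alltoall_traffic ((k' : Nat) : Int) ((n' : Nat) : Int)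
      = alltoall_traffic_alt ((k' : Nat) : Int) ((n' : Nat) : Int) := by
  have hnode : (PySem.List.pyRange 0 ((k' : Nat) : Int) 1).foldl (fun nd i => nd ++ [i]) []
      = pvRamp 0 k' := by
    rw [PySem.List.foldl_append_singleton_eq_self, PySem.List.pyRange_one]
    simp [pvRamp]
  have hinitB : (List.range (((k' : Nat) : Int)).toNat).map Int.ofNat = pvRamp 0 k' := by
    simp only [Int.toNat_natCast]
    rw [pvRamp]
    apply List.map_congr_left
    intro j _
    simp
  have hpool : (List.range (((n' : Nat) : Int)).toNat).map Int.ofNat = pvRangeMap n' := by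
    rw [pvRangeMap]
    simp
  by_cases hkn : k' ≤ n'
  · -- 1 ≤ k ≤ n: both lists are the distinct words in lexicographic order
    have hn : 0 < n' := by omega
    obtain ⟨l₁, l₂, hsplit, hl₁⟩ := pvWordsSplit (show 0 < k' by omega) hkn
    have hMcons : (pvWords k' n').filter (fun v => decide v.Nodup)
        = pvRamp 0 k' :: l₂.filter (fun v => decide v.Nodup) := by
      rw [hsplit, List.filter_append, hl₁, List.filter_cons]
      simp [pvRamp_nodup]
    have hfuel : pvFuel ((k' : Nat) : Int) ((n' : Nat) : Int) = n' ^ k' + 2 := by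
      rw [pvFuel, max_eq_left (by exact_mod_cast hkn)]
      simp
    have hl₂fuel : l₂.length < n' ^ k' + 2 := by
      have := pvWords_length (r := k') (n := n')
      rw [hsplit] at this
      simp at this
      omega
    have hnodesA : pvMainLoop ((k' : Nat) : Int) ((n' : Nat) : Int)
        (pvFuel ((k' : Nat) : Int) ((n' : Nat) : Int)) (pvRamp 0 k') [pvRamp 0 k']
        = pvRamp 0 k' :: l₂.filter (fun v => decide v.Nodup) := by
      rw [hfuel]
      rw [pvMainLoop_spec (by omega) hn l₂ l₁ (pvRamp 0 k') [pvRamp 0 k'] _ hsplit hl₂fuel]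
      simp
    have hninit : pvRamp 0 k' ∉ l₂ := by
      have hwnd := pvWords_nodup (r := k') (n := n') hn
      rw [hsplit, List.nodup_append] at hwnd
      exact (List.nodup_cons.mp hwnd.2.1).1
    have hnodesB : (pvPerms ((List.range (((n' : Nat) : Int)).toNat).map Int.ofNat)
          ((k' : Nat) : Int)).filter (fun p => p != pvRamp 0 k')
        = l₂.filter (fun v => decide v.Nodup) := by
      rw [hpool, pvPerms, pvPermsAux_spec k' (pvRangeMap n') (List.Sublist.refl _)]
      have hMf : (pvWords k' n').filter (fun w => decide (w.Nodup ∧ ∀ x ∈ w, x ∈ pvRangeMap n'))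
          = (pvWords k' n').filter (fun v => decide v.Nodup) := by
        apply List.filter_congr
        intro w hw
        rcases pvWords_mem.mp hw with ⟨_, hb⟩
        simp only [decide_eq_decide]
        constructor
        · rintro ⟨hnd, _⟩; exact hnd
        · intro hnd
          exact ⟨hnd, fun x hx => pvRangeMap_mem.mpr (hb x hx)⟩
      rw [hMf, hMcons, List.filter_cons]
      rw [show (pvRamp 0 k' != pvRamp 0 k') = false by simp]
      apply List.filter_eq_self.mpr
      intro w hw
      have hwl₂ : w ∈ l₂ := (List.mem_filter.mp hw).1
      have hne : w ≠ pvRamp 0 k' := fun hc => hninit (hc ▸ hwl₂)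
      simpa using hne
    rw [alltoall_traffic, alltoall_traffic_alt]
    simp only [hnode, hinitB, hnodesA, hnodesB, hMcons]
    rw [pvCrossOuter]
    simp
  · -- n < k: no k-permutation exists, both lists contain only the initial node
    push_neg at hkn
    have hnodesB : (pvPerms ((List.range (((n' : Nat) : Int)).toNat).map Int.ofNat)
          ((k' : Nat) : Int)).filter (fun p => p != pvRamp 0 k') = [] := by
      rw [hpool, pvPerms, pvPermsAux_nil _ _ _ (by simp [pvRangeMap]; omega)]
      rfl
    have hlenramp : (pvRamp 0 k').length = k' := pvRamp_length 0 k'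
    have hkl : ((k' : Nat) : Int) = (((pvRamp 0 k').length : Nat) : Int) := by rw [hlenramp]
    have hfuel : pvFuel ((k' : Nat) : Int) ((n' : Nat) : Int) = k' ^ k' + 2 := by
      rw [pvFuel, max_eq_right (by exact_mod_cast (le_of_lt hkn))]
      simp
    have hnodesA : pvMainLoop ((k' : Nat) : Int) ((n' : Nat) : Int)
        (pvFuel ((k' : Nat) : Int) ((n' : Nat) : Int)) (pvRamp 0 k') [pvRamp 0 k']
        = [pvRamp 0 k'] := by
      rcases Nat.lt_or_ge n' 2 with hn1 | hn2
      · -- n ≤ 1: the very first increment already reports the last node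
        have hinc : pvIncrementNode ((k' : Nat) : Int) ((n' : Nat) : Int) (pvRamp 0 k')
            = (true, pvRamp 0 k') := by
          rw [pvIncrementNode, if_neg (by omega),
            show (((k' : Nat) : Int) - 1).toNat = k' - 1 by omega]
          apply pvIncLoop_none (k' - 1) (by omega)
          intro j hj _
          rw [pvRamp_getElem 0 k' j hj]
          omega
        rw [hfuel, show k' ^ k' + 2 = (k' ^ k' + 1) + 1 by omega]
        simp [pvMainLoop, hinc]
      · -- 2 ≤ n < k: one increment lands on a word, and no later word is a permutation
        set i₀ : Nat := n' - 2 with hi₀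
        have hi₀k : i₀ < k' := by omega
        have hi₀r : i₀ < (pvRamp 0 k').length := by omega
        set w₀ : List Int := pvRamp 0 i₀ ++ ((i₀ : Int) + 1) :: List.replicate (k' - 1 - i₀) 0
          with hw₀
        have hinc : pvIncrementNode ((k' : Nat) : Int) ((n' : Nat) : Int) (pvRamp 0 k')
            = (false, w₀) := by
          rw [pvIncrementNode, if_neg (by omega),
            show (((k' : Nat) : Int) - 1).toNat = k' - 1 by omega]
          rw [pvIncLoop_find hkl (k' - 1) (by omega) i₀ hi₀r (by omega)
            (by rw [pvRamp_getElem 0 k' i₀ hi₀r]; push_cast; omega)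
            (fun j hj hij _ => by rw [pvRamp_getElem 0 k' j hj]; push_cast; omega)]
          rw [pvRamp_take 0 k' i₀ (by omega), pvRamp_getElem 0 k' i₀ hi₀r, hlenramp]
          simp
          exact hw₀.symm
        have hw₀len : w₀.length = k' := by
          rw [hw₀]
          simp [pvRamp_length]
          omega
        have hw₀mem : w₀ ∈ pvWords k' n' := by
          refine pvWords_mem.mpr ⟨hw₀len, ?_⟩
          intro x hx
          rw [hw₀] at hx
          rcases List.mem_append.mp hx with hx | hx
          · rcases List.mem_map.mp hx with ⟨j, hj, rfl⟩
            simp at hj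
            constructor
            · omega
            · push_cast; omega
          · rcases List.mem_cons.mp hx with rfl | hx
            · constructor
              · positivity
              · push_cast; omega
            · rw [List.eq_of_mem_replicate hx]
              constructor
              · omega
              · push_cast; omega
        have hw₀nd : ¬ w₀.Nodup := by
          intro hnd
          have hsl : List.Sublist (List.replicate (k' - 1 - i₀) (0 : Int)) w₀ := by
            rw [hw₀]
            exact (List.sublist_cons_self _ _).trans (List.sublist_append_right _ _)
          have := hnd.sublist hsl
          rw [List.nodup_replicate] at this
          omega
        have htest : pvTestPermutation ((k' : Nat) : Int) ((n' : Nat) : Int) w₀ = false := by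
          rw [show ((k' : Nat) : Int) = ((w₀.length : Nat) : Int) by rw [hw₀len],
            pvTestPermutation_spec]
          simpa using hw₀nd
        obtain ⟨l₁, l₂, hsplit⟩ := List.append_of_mem hw₀mem
        have hl₂fuel : l₂.length < k' ^ k' + 1 := by
          have hwl := pvWords_length (r := k') (n := n')
          rw [hsplit] at hwl
          simp at hwl
          have hple : n' ^ k' ≤ k' ^ k' := Nat.pow_le_pow_left (by omega) k'
          omega
        have hfl₂ : l₂.filter (fun v => decide v.Nodup) = [] := by
          rw [List.filter_eq_nil_iff]
          intro w hw
          simp only [decide_eq_true_eq]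
          exact pvNoPerm hkn (by rw [hsplit]; simp [hw])
        rw [hfuel, show k' ^ k' + 2 = (k' ^ k' + 1) + 1 by omega]
        have hstep : pvMainLoop ((k' : Nat) : Int) ((n' : Nat) : Int) ((k' ^ k' + 1) + 1)
            (pvRamp 0 k') [pvRamp 0 k']
            = pvMainLoop ((k' : Nat) : Int) ((n' : Nat) : Int) (k' ^ k' + 1) w₀ [pvRamp 0 k'] := by
          conv_lhs => rw [pvMainLoop]
          simp [hinc, htest]
        rw [hstep,
          pvMainLoop_spec (by omega) (by omega) l₂ l₁ w₀ [pvRamp 0 k'] _ hsplit hl₂fuel, hfl₂]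
        simp
    rw [alltoall_traffic, alltoall_traffic_alt]
    simp only [hnode, hinitB, hnodesA, hnodesB]
    rw [pvCrossOuter]
    simp

-- negative n behaves exactly like n = 0: range(n) is empty and no digit is below n-1
theorem pvAgree (k' : Nat) (nI : Int) (hk : 1 ≤ k') :
    alltoall_traffic ((k' : Nat) : Int) nI = alltoall_traffic_alt ((k' : Nat) : Int) nI := by
  by_cases hn0 : 0 ≤ nI
  · rw [show nI = ((nI.toNat : Nat) : Int) by omega]
    exact pvAgreeNat k' nI.toNat hk
  · push_neg at hn0
    have hnode : (PySem.List.pyRange 0 ((k' : Nat) : Int) 1).foldl (fun nd i => nd ++ [i]) []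
        = pvRamp 0 k' := by
      rw [PySem.List.foldl_append_singleton_eq_self, PySem.List.pyRange_one]
      simp [pvRamp]
    have hinitB : (List.range (((k' : Nat) : Int)).toNat).map Int.ofNat = pvRamp 0 k' := by
      simp only [Int.toNat_natCast]
      rw [pvRamp]
      apply List.map_congr_left
      intro j _
      simp
    have hpool : (List.range nI.toNat).map Int.ofNat = [] := by
      rw [show nI.toNat = 0 by omega]
      simp
    have hnodesB : (pvPerms ((List.range nI.toNat).map Int.ofNat) ((k' : Nat) : Int)).filter
          (fun p => p != pvRamp 0 k') = [] := by
      rw [hpool, pvPerms, pvPermsAux_nil _ _ _ (by simp; omega)]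
      rfl
    have hfuel : pvFuel ((k' : Nat) : Int) nI = k' ^ k' + 2 := by
      rw [pvFuel, max_eq_right (by omega)]
      simp
    have hinc : pvIncrementNode ((k' : Nat) : Int) nI (pvRamp 0 k') = (true, pvRamp 0 k') := by
      rw [pvIncrementNode, if_neg (by omega),
        show (((k' : Nat) : Int) - 1).toNat = k' - 1 by omega]
      apply pvIncLoop_none (k' - 1) (by rw [pvRamp_length]; omega)
      intro j hj _
      rw [pvRamp_getElem 0 k' j hj]
      omega
    have hnodesA : pvMainLoop ((k' : Nat) : Int) nI (pvFuel ((k' : Nat) : Int) nI)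
        (pvRamp 0 k') [pvRamp 0 k'] = [pvRamp 0 k'] := by
      rw [hfuel, show k' ^ k' + 2 = (k' ^ k' + 1) + 1 by omega]
      simp [pvMainLoop, hinc]
    rw [alltoall_traffic, alltoall_traffic_alt]
    simp only [hnode, hinitB, hnodesA, hnodesB]
    rw [pvCrossOuter]
    simp

-- ===== VERDICT (by name: the statement is the Claim_ definition above) =====
theorem alltoall_traffic_spec : Claim_equal_alltoall_traffic := by
  intro k n _ hpre
  unfold Spec_alltoall_traffic
  unfold Pre_alltoall_traffic at hpre
  rw [show k = ((k.toNat : Nat) : Int) by omega]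
  exact pvAgree k.toNat n (by omega)
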